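-- pv_equiv track=rewrite | github.com/jinyiliu/.config | utils/arxiv.py | term_readable
-- ===== SOURCE A (Python) =====
-- def term_readable(text: str) -> str:
--     text = text.replace('$', '')
--     # Make terminal outputs more readable
--     replacements = {
--         # Greek letters
--         u"\\Lambda"     : 'Λ',
--         r"\alpha"       : 'α',
--         r"\gamma"       : 'γ',
--         # Latex symbols
--         r"\sim"     : '~',
--         # Common quantities
--         r"H_0"              : 'H0',
--         r"\Omega_K"         : 'Omega_K',
--         r"[H I]_{\rm 21cm}" : '[HI]_21cm',
--         # French
--         u"\\'o" : 'ó',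
--         r"\`o"  : 'ò',
--         r"\^{i}": 'i',
--     }
--     for key, value in replacements.items():
--         text = text.replace(key, value)
--
--     return text
-- ===== SOURCE B (Python) =====
-- # One left-to-right scan with a dispatch table instead of ten sequential full-string replace passes.
-- _TABLE = [
--     ("\\Lambda", 'Λ'),
--     (r"\alpha", 'α'),
--     (r"\gamma", 'γ'),
--     (r"\sim", '~'),
--     (r"H_0", 'H0'),
--     (r"\Omega_K", 'Omega_K'),
--     (r"[H I]_{\rm 21cm}", '[HI]_21cm'),
--     ("\\'o", 'ó'),
--     (r"\`o", 'ò'),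
--     (r"\^{i}", 'i'),
-- ]
--
-- def term_readable(text: str) -> str:
--     text = text.replace('$', '')
--     out = []
--     i = 0
--     n = len(text)
--     while i < n:
--         for key, value in _TABLE:
--             if text.startswith(key, i):
--                 out.append(value)
--                 i += len(key)
--                 break
--         else:
--             out.append(text[i])
--             i += 1
--     return ''.join(out)
-- ===== Notes on version B (the rewrite author's own statement) =====
-- stated objective: alternative
-- what changed: Replaced the ten sequential full-string replace passes by a single left-to-right scan that consults a dispatch table at each position (valid because keys never overlap and no value re-creates a key).
import Mathlib
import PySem

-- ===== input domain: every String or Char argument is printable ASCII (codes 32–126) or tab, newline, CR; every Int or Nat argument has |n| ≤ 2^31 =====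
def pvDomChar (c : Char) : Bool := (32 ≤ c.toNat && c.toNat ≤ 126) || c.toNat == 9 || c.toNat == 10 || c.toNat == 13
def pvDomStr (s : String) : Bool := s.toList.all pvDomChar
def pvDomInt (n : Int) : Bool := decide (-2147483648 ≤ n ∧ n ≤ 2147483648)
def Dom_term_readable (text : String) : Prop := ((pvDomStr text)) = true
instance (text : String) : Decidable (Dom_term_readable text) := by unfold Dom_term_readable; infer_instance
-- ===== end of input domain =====

-- B replaces A's ten sequential full-string replace passes by one left-to-right scan driven by
-- a dispatch table (objective: alternative structure, same exact result).

-- ===== PORT A =====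
-- A's replacement dict, in insertion order
def pvReplacements : List (String × String) :=
  [("\\Lambda", "Λ"), ("\\alpha", "α"), ("\\gamma", "γ"), ("\\sim", "~"),
   ("H_0", "H0"), ("\\Omega_K", "Omega_K"), ("[H I]_{\\rm 21cm}", "[HI]_21cm"),
   ("\\'o", "ó"), ("\\`o", "ò"), ("\\^{i}", "i")]

def term_readable (text : String) : String :=
  pvReplacements.foldl (fun t kv => PySem.Str.replace t kv.1 kv.2)
    (PySem.Str.replace text "$" "")

-- ===== PORT B =====
-- B's dispatch table (Source B's _TABLE), held directly as character lists
def pvTable : List (List Char × List Char) :=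
  [(['\\', 'L', 'a', 'm', 'b', 'd', 'a'], ['Λ']),
   (['\\', 'a', 'l', 'p', 'h', 'a'], ['α']),
   (['\\', 'g', 'a', 'm', 'm', 'a'], ['γ']),
   (['\\', 's', 'i', 'm'], ['~']),
   (['H', '_', '0'], ['H', '0']),
   (['\\', 'O', 'm', 'e', 'g', 'a', '_', 'K'], ['O', 'm', 'e', 'g', 'a', '_', 'K']),
   (['[', 'H', ' ', 'I', ']', '_', '{', '\\', 'r', 'm', ' ', '2', '1', 'c', 'm', '}'],
    ['[', 'H', 'I', ']', '_', '2', '1', 'c', 'm']),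
   (['\\', '\'', 'o'], ['ó']),
   (['\\', '`', 'o'], ['ò']),
   (['\\', '^', '{', 'i', '}'], ['i'])]

-- one pass: at each position the first table key that matches is emitted as its value
-- (the `!kv.1.isEmpty` guard only makes the recursion total; every table key is nonempty)
def pvScan (tbl : List (List Char × List Char)) : List Char → List Char
  | [] => []
  | c :: cs =>
    match tbl.find? (fun kv => !kv.1.isEmpty && kv.1.isPrefixOf (c :: cs)) with
    | some kv => kv.2 ++ pvScan tbl (cs.drop (kv.1.length - 1))
    | none => c :: pvScan tbl cs
termination_by l => l.length
decreasing_by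
  all_goals simp [List.length_drop]

def term_readable_alt (text : String) : String :=
  String.ofList (pvScan pvTable (PySem.Str.replace text "$" "").toList)

-- ===== PRECONDITION & SPEC =====
def Spec_term_readable (text : String) (out : String) : Prop := out = term_readable_alt text
instance (text : String) (out : String) : Decidable (Spec_term_readable text out) := by unfold Spec_term_readable; infer_instance

-- ===== CLAIM (what is proved, stated in full; the proofs are below) =====
def Claim_equal_term_readable : Prop := ∀ (text : String), Dom_term_readable text → Spec_term_readable text (term_readable text)

-- ===== LEMMAS AND PROOFS =====

def pvRepl (k0 : Char) (ktl val : List Char) : List Char → List Char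
  | [] => []
  | c :: cs =>
    if (k0 :: ktl).isPrefixOf (c :: cs) then val ++ pvRepl k0 ktl val (cs.drop ktl.length)
    else c :: pvRepl k0 ktl val cs
termination_by l => l.length
decreasing_by
  all_goals simp [List.length_drop]

theorem pvRepl_go (k0 : Char) (ktl val : List Char) :
    ∀ (fuel : Nat) (l acc : List Char), l.length ≤ fuel →
      PySem.Chars.replace.go (k0 :: ktl) val fuel l acc = acc.reverse ++ pvRepl k0 ktl val l := by
  intro fuel
  induction fuel with
  | zero =>
    intro l acc h
    have hl : l = [] := List.eq_nil_of_length_eq_zero (Nat.le_zero.mp h)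
    subst hl
    simp [PySem.Chars.replace.go, pvRepl]
  | succ n ih =>
    intro l acc h
    match l with
    | [] => simp [PySem.Chars.replace.go, pvRepl]
    | c :: cs =>
      rw [PySem.Chars.replace.go]
      by_cases hp : (k0 :: ktl).isPrefixOf (c :: cs)
      · rw [if_pos hp]
        have hlen : (cs.drop ktl.length).length ≤ n := by
          simp [List.length_drop] at *; omega
        rw [show (c :: cs).drop (k0 :: ktl).length = cs.drop ktl.length by simp]
        rw [ih _ _ hlen]
        rw [pvRepl, if_pos hp]
        simp
      · rw [if_neg hp]
        have hlen : cs.length ≤ n := by simp at h; omega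
        rw [ih _ _ hlen]
        rw [pvRepl, if_neg hp]
        simp

theorem pvReplace_eq_pvRepl (k0 : Char) (ktl val l : List Char) :
    PySem.Chars.replace l (k0 :: ktl) val = pvRepl k0 ktl val l := by
  rw [PySem.Chars.replace]
  simp [pvRepl_go k0 ktl val l.length l [] (le_refl _)]

abbrev pvNoOv (a b : List Char) : Prop :=
  ∀ p, p < a.length → ¬ (a.drop p <+: b) ∧ ¬ (b <+: a.drop p)

theorem pvNot_prefix_append {s u b : List Char} (h : pvNoOv s b) (hs : s ≠ []) :
    ¬ b <+: s ++ u := by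
  intro hb
  have h0 := h 0 (by cases s with | nil => exact absurd rfl hs | cons a t => simp)
  simp at h0
  rcases List.prefix_or_prefix_of_prefix hb (List.prefix_append s u) with h1 | h1
  · exact h0.2 h1
  · exact h0.1 h1

theorem pvNoOv_tail {c : Char} {s b : List Char} (h : pvNoOv (c :: s) b) : pvNoOv s b := by
  intro p hp
  have := h (p + 1) (by simp; omega)
  simpa using this

theorem pvRepl_append {k0 : Char} {ktl val : List Char} :
    ∀ {s : List Char}, pvNoOv s (k0 :: ktl) →
      ∀ u, pvRepl k0 ktl val (s ++ u) = s ++ pvRepl k0 ktl val u := by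
  intro s
  induction s with
  | nil => intro _ u; simp
  | cons c s' ih =>
    intro h u
    have hnp : ¬ (k0 :: ktl) <+: (c :: s') ++ u := pvNot_prefix_append h (by simp)
    have hnp' : ¬ (k0 :: ktl).isPrefixOf (c :: (s' ++ u)) := by
      simpa [List.isPrefixOf_iff_prefix] using hnp
    rw [List.cons_append, pvRepl, if_neg hnp', ih (pvNoOv_tail h) u, List.cons_append]

theorem pvScan_append {tbl : List (List Char × List Char)} :
    ∀ {s : List Char}, (∀ kv ∈ tbl, pvNoOv s kv.1) →
      ∀ u, pvScan tbl (s ++ u) = s ++ pvScan tbl u := by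
  intro s
  induction s with
  | nil => intro _ u; simp
  | cons c s' ih =>
    intro h u
    have hnone : tbl.find? (fun kv => !kv.1.isEmpty && kv.1.isPrefixOf (c :: (s' ++ u))) = none := by
      rw [List.find?_eq_none]
      intro kv hkv
      cases hk1 : kv.1 with
      | nil => simp
      | cons a t =>
        have : ¬ kv.1 <+: (c :: s') ++ u := pvNot_prefix_append (h kv hkv) (by simp)
        rw [hk1] at this
        simp [List.isPrefixOf_iff_prefix]
        intro hac hct
        apply this
        rw [List.cons_append]
        exact List.cons_prefix_cons.mpr ⟨hac, hct⟩
    rw [List.cons_append, pvScan, hnone]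
    rw [ih (fun kv hkv => pvNoOv_tail (h kv hkv)) u, List.cons_append]

theorem pvScan_prefix {tbl : List (List Char × List Char)} {k : List Char}
    (h : ∀ kv ∈ tbl, pvNoOv k kv.2) :
    ∀ (u : List Char) (p : Nat), p < k.length → k.drop p <+: pvScan tbl u → k.drop p <+: u := by
  suffices H : ∀ (n : Nat) (u : List Char), u.length = n → ∀ (p : Nat), p < k.length →
      k.drop p <+: pvScan tbl u → k.drop p <+: u by
    intro u p hp hpre; exact H u.length u rfl p hp hpre
  intro n
  induction n using Nat.strong_induction_on with
  | _ n ih =>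
    intro u hn p hp hpre
    match u with
    | [] =>
      simp only [pvScan] at hpre
      have := List.prefix_nil.mp hpre
      have hlen : k.length ≤ p := by
        have := congrArg List.length this
        simp [List.length_drop] at this; omega
      omega
    | c :: cs =>
      rw [pvScan] at hpre
      cases hfind : tbl.find? (fun kv => !kv.1.isEmpty && kv.1.isPrefixOf (c :: cs)) with
      | some kv =>
        rw [hfind] at hpre
        have hmem := List.mem_of_find?_eq_some hfind
        have hno := h kv hmem p hp
        rcases List.prefix_or_prefix_of_prefix hpre (List.prefix_append kv.2 _) with h1 | h1
        · exact absurd h1 hno.1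
        · exact absurd h1 hno.2
      | none =>
        rw [hfind] at hpre
        have hdrop : k.drop p = k[p] :: k.drop (p + 1) := List.drop_eq_getElem_cons hp
        rw [hdrop] at hpre ⊢
        have hcp := List.cons_prefix_cons.mp hpre
        refine List.cons_prefix_cons.mpr ⟨hcp.1, ?_⟩
        by_cases hp1 : p + 1 < k.length
        · have hlt : cs.length < n := by simp at hn; omega
          exact ih cs.length hlt cs rfl (p + 1) hp1 hcp.2
        · have : k.drop (p + 1) = [] := by
            apply List.drop_eq_nil_of_le; omega
          simp [this]

theorem pvScan_cons_some {tbl : List (List Char × List Char)} {c : Char} {cs : List Char}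
    {kv : List Char × List Char}
    (h : tbl.find? (fun kv => !kv.1.isEmpty && kv.1.isPrefixOf (c :: cs)) = some kv) :
    pvScan tbl (c :: cs) = kv.2 ++ pvScan tbl (cs.drop (kv.1.length - 1)) := by
  rw [pvScan, h]

theorem pvScan_cons_none {tbl : List (List Char × List Char)} {c : Char} {cs : List Char}
    (h : tbl.find? (fun kv => !kv.1.isEmpty && kv.1.isPrefixOf (c :: cs)) = none) :
    pvScan tbl (c :: cs) = c :: pvScan tbl cs := by
  rw [pvScan, h]

theorem pvStep {tbl : List (List Char × List Char)} {k0 : Char} {ktl val : List Char}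
    (hA : ∀ kv ∈ tbl, pvNoOv kv.2 (k0 :: ktl))
    (hB : ∀ kv ∈ tbl, pvNoOv (k0 :: ktl) kv.1)
    (hC : ∀ kv ∈ tbl, pvNoOv (k0 :: ktl) kv.2) :
    ∀ l, pvRepl k0 ktl val (pvScan tbl l) = pvScan (tbl ++ [(k0 :: ktl, val)]) l := by
  suffices H : ∀ (n : Nat) (l : List Char), l.length = n →
      pvRepl k0 ktl val (pvScan tbl l) = pvScan (tbl ++ [(k0 :: ktl, val)]) l by
    intro l; exact H l.length l rfl
  intro n
  induction n using Nat.strong_induction_on with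
  | _ n ih =>
    intro l hn
    match l with
    | [] => simp only [pvScan, pvRepl]
    | c :: cs =>
      cases hfind : tbl.find? (fun kv => !kv.1.isEmpty && kv.1.isPrefixOf (c :: cs)) with
      | some kv =>
        have hmem := List.mem_of_find?_eq_some hfind
        have hfind2 : (tbl ++ [(k0 :: ktl, val)]).find?
            (fun kv => !kv.1.isEmpty && kv.1.isPrefixOf (c :: cs)) = some kv := by
          rw [List.find?_append, hfind]; rfl
        rw [pvScan_cons_some hfind, pvScan_cons_some hfind2]
        rw [pvRepl_append (hA kv hmem)]
        congr 1
        have hlt : (cs.drop (kv.1.length - 1)).length < n := by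
          simp [List.length_drop] at *; omega
        exact ih _ hlt _ rfl
      | none =>
        by_cases hk : (k0 :: ktl) <+: (c :: cs)
        · obtain ⟨rest, hrest⟩ := hk
          have hcs : cs = ktl ++ rest := by
            have := hrest
            simp only [List.cons_append] at this
            exact ((List.cons.injEq _ _ _ _).mp this |>.2).symm
          have hfind2 : (tbl ++ [(k0 :: ktl, val)]).find?
              (fun kv => !kv.1.isEmpty && kv.1.isPrefixOf (c :: cs)) = some (k0 :: ktl, val) := by
            have hprefix : (k0 :: ktl).isPrefixOf (c :: cs) = true := by
              simp only [List.isPrefixOf_iff_prefix]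
              exact ⟨rest, hrest⟩
            rw [List.find?_append, hfind]
            simp [List.find?, hprefix]
          rw [pvScan_cons_some hfind2]
          have hscan : pvScan tbl (c :: cs) = (k0 :: ktl) ++ pvScan tbl rest := by
            rw [show c :: cs = (k0 :: ktl) ++ rest from hrest.symm]
            exact pvScan_append hB rest
          rw [hscan]
          have hpre : (k0 :: ktl).isPrefixOf (k0 :: (ktl ++ pvScan tbl rest)) := by
            simp [List.isPrefixOf_iff_prefix]
          rw [List.cons_append, pvRepl, if_pos hpre, List.drop_left]
          have hlt : rest.length < n := by
            have := congrArg List.length hrest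
            simp at this hn; omega
          rw [ih rest.length hlt rest rfl]
          have hdrop : cs.drop ((k0 :: ktl).length - 1) = rest := by
            rw [hcs]; simp
          rw [hdrop]
        · have hfind2 : (tbl ++ [(k0 :: ktl, val)]).find?
              (fun kv => !kv.1.isEmpty && kv.1.isPrefixOf (c :: cs)) = none := by
            have hnp : (k0 :: ktl).isPrefixOf (c :: cs) = false := by
              simp only [Bool.eq_false_iff, ne_eq, List.isPrefixOf_iff_prefix]
              exact hk
            rw [List.find?_append, hfind]
            simp [List.find?, hnp]
          rw [pvScan_cons_none hfind, pvScan_cons_none hfind2]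
          have hnotpre : ¬ (k0 :: ktl).isPrefixOf (c :: pvScan tbl cs) := by
            simp [List.isPrefixOf_iff_prefix, List.cons_prefix_cons]
            intro hk0 hktl
            cases hktl0 : ktl with
            | nil =>
              apply hk
              rw [hktl0, hk0]
              exact List.cons_prefix_cons.mpr ⟨rfl, List.nil_prefix⟩
            | cons a t =>
              have h1lt : 1 < (k0 :: ktl).length := by simp [hktl0]
              have := pvScan_prefix hC cs 1 h1lt (by simpa using hktl)
              apply hk
              exact List.cons_prefix_cons.mpr ⟨hk0, by simpa using this⟩
          rw [pvRepl, if_neg hnotpre]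
          congr 1
          have hlt : cs.length < n := by simp at hn; omega
          exact ih cs.length hlt cs rfl

theorem pvScan_nil_tbl : ∀ u, pvScan [] u = u := by
  intro u
  induction u with
  | nil => simp [pvScan]
  | cons c cs ih => rw [pvScan_cons_none (by simp)]; rw [ih]

theorem pvChain (u : List Char) :
    pvScan pvTable u =
      (pvReplacements.map (fun kv => (kv.1.toList, kv.2.toList))).foldl
        (fun t kv => PySem.Chars.replace t kv.1 kv.2) u := by
  have e : pvReplacements.map (fun kv => (kv.1.toList, kv.2.toList)) = pvTable := by decide
  rw [e]
  simp only [pvTable, List.foldl]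
  simp only [pvReplace_eq_pvRepl]
  have s1 : ∀ w, pvRepl '\\' ['L', 'a', 'm', 'b', 'd', 'a'] ['Λ'] (w) =
      pvScan ([(['\\', 'L', 'a', 'm', 'b', 'd', 'a'], ['Λ'])] : List (List Char × List Char)) w := by
    intro w
    have h0 := pvScan_nil_tbl w
    calc pvRepl '\\' ['L', 'a', 'm', 'b', 'd', 'a'] ['Λ'] w = pvRepl '\\' ['L', 'a', 'm', 'b', 'd', 'a'] ['Λ'] (pvScan [] w) := by rw [h0]
      _ = _ := pvStep (by decide) (by decide) (by decide) w
  have s2 : ∀ w, pvRepl '\\' ['a', 'l', 'p', 'h', 'a'] ['α'] (pvScan ([(['\\', 'L', 'a', 'm', 'b', 'd', 'a'], ['Λ'])] : List (List Char × List Char)) w) =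
      pvScan ([(['\\', 'L', 'a', 'm', 'b', 'd', 'a'], ['Λ']), (['\\', 'a', 'l', 'p', 'h', 'a'], ['α'])] : List (List Char × List Char)) w := by
    intro w
    exact pvStep (by decide) (by decide) (by decide) w
  have s3 : ∀ w, pvRepl '\\' ['g', 'a', 'm', 'm', 'a'] ['γ'] (pvScan ([(['\\', 'L', 'a', 'm', 'b', 'd', 'a'], ['Λ']), (['\\', 'a', 'l', 'p', 'h', 'a'], ['α'])] : List (List Char × List Char)) w) =
      pvScan ([(['\\', 'L', 'a', 'm', 'b', 'd', 'a'], ['Λ']), (['\\', 'a', 'l', 'p', 'h', 'a'], ['α']), (['\\', 'g', 'a', 'm', 'm', 'a'], ['γ'])] : List (List Char × List Char)) w := by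
    intro w
    exact pvStep (by decide) (by decide) (by decide) w
  have s4 : ∀ w, pvRepl '\\' ['s', 'i', 'm'] ['~'] (pvScan ([(['\\', 'L', 'a', 'm', 'b', 'd', 'a'], ['Λ']), (['\\', 'a', 'l', 'p', 'h', 'a'], ['α']), (['\\', 'g', 'a', 'm', 'm', 'a'], ['γ'])] : List (List Char × List Char)) w) =
      pvScan ([(['\\', 'L', 'a', 'm', 'b', 'd', 'a'], ['Λ']), (['\\', 'a', 'l', 'p', 'h', 'a'], ['α']), (['\\', 'g', 'a', 'm', 'm', 'a'], ['γ']), (['\\', 's', 'i', 'm'], ['~'])] : List (List Char × List Char)) w := by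
    intro w
    exact pvStep (by decide) (by decide) (by decide) w
  have s5 : ∀ w, pvRepl 'H' ['_', '0'] ['H', '0'] (pvScan ([(['\\', 'L', 'a', 'm', 'b', 'd', 'a'], ['Λ']), (['\\', 'a', 'l', 'p', 'h', 'a'], ['α']), (['\\', 'g', 'a', 'm', 'm', 'a'], ['γ']), (['\\', 's', 'i', 'm'], ['~'])] : List (List Char × List Char)) w) =
      pvScan ([(['\\', 'L', 'a', 'm', 'b', 'd', 'a'], ['Λ']), (['\\', 'a', 'l', 'p', 'h', 'a'], ['α']), (['\\', 'g', 'a', 'm', 'm', 'a'], ['γ']), (['\\', 's', 'i', 'm'], ['~']), (['H', '_', '0'], ['H', '0'])] : List (List Char × List Char)) w := by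
    intro w
    exact pvStep (by decide) (by decide) (by decide) w
  have s6 : ∀ w, pvRepl '\\' ['O', 'm', 'e', 'g', 'a', '_', 'K'] ['O', 'm', 'e', 'g', 'a', '_', 'K'] (pvScan ([(['\\', 'L', 'a', 'm', 'b', 'd', 'a'], ['Λ']), (['\\', 'a', 'l', 'p', 'h', 'a'], ['α']), (['\\', 'g', 'a', 'm', 'm', 'a'], ['γ']), (['\\', 's', 'i', 'm'], ['~']), (['H', '_', '0'], ['H', '0'])] : List (List Char × List Char)) w) =
      pvScan ([(['\\', 'L', 'a', 'm', 'b', 'd', 'a'], ['Λ']), (['\\', 'a', 'l', 'p', 'h', 'a'], ['α']), (['\\', 'g', 'a', 'm', 'm', 'a'], ['γ']), (['\\', 's', 'i', 'm'], ['~']), (['H', '_', '0'], ['H', '0']), (['\\', 'O', 'm', 'e', 'g', 'a', '_', 'K'], ['O', 'm', 'e', 'g', 'a', '_', 'K'])] : List (List Char × List Char)) w := by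
    intro w
    exact pvStep (by decide) (by decide) (by decide) w
  have s7 : ∀ w, pvRepl '[' ['H', ' ', 'I', ']', '_', '{', '\\', 'r', 'm', ' ', '2', '1', 'c', 'm', '}'] ['[', 'H', 'I', ']', '_', '2', '1', 'c', 'm'] (pvScan ([(['\\', 'L', 'a', 'm', 'b', 'd', 'a'], ['Λ']), (['\\', 'a', 'l', 'p', 'h', 'a'], ['α']), (['\\', 'g', 'a', 'm', 'm', 'a'], ['γ']), (['\\', 's', 'i', 'm'], ['~']), (['H', '_', '0'], ['H', '0']), (['\\', 'O', 'm', 'e', 'g', 'a', '_', 'K'], ['O', 'm', 'e', 'g', 'a', '_', 'K'])] : List (List Char × List Char)) w) =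
      pvScan ([(['\\', 'L', 'a', 'm', 'b', 'd', 'a'], ['Λ']), (['\\', 'a', 'l', 'p', 'h', 'a'], ['α']), (['\\', 'g', 'a', 'm', 'm', 'a'], ['γ']), (['\\', 's', 'i', 'm'], ['~']), (['H', '_', '0'], ['H', '0']), (['\\', 'O', 'm', 'e', 'g', 'a', '_', 'K'], ['O', 'm', 'e', 'g', 'a', '_', 'K']), (['[', 'H', ' ', 'I', ']', '_', '{', '\\', 'r', 'm', ' ', '2', '1', 'c', 'm', '}'], ['[', 'H', 'I', ']', '_', '2', '1', 'c', 'm'])] : List (List Char × List Char)) w := by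
    intro w
    exact pvStep (by decide) (by decide) (by decide) w
  have s8 : ∀ w, pvRepl '\\' ['\'', 'o'] ['ó'] (pvScan ([(['\\', 'L', 'a', 'm', 'b', 'd', 'a'], ['Λ']), (['\\', 'a', 'l', 'p', 'h', 'a'], ['α']), (['\\', 'g', 'a', 'm', 'm', 'a'], ['γ']), (['\\', 's', 'i', 'm'], ['~']), (['H', '_', '0'], ['H', '0']), (['\\', 'O', 'm', 'e', 'g', 'a', '_', 'K'], ['O', 'm', 'e', 'g', 'a', '_', 'K']), (['[', 'H', ' ', 'I', ']', '_', '{', '\\', 'r', 'm', ' ', '2', '1', 'c', 'm', '}'], ['[', 'H', 'I', ']', '_', '2', '1', 'c', 'm'])] : List (List Char × List Char)) w) =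
      pvScan ([(['\\', 'L', 'a', 'm', 'b', 'd', 'a'], ['Λ']), (['\\', 'a', 'l', 'p', 'h', 'a'], ['α']), (['\\', 'g', 'a', 'm', 'm', 'a'], ['γ']), (['\\', 's', 'i', 'm'], ['~']), (['H', '_', '0'], ['H', '0']), (['\\', 'O', 'm', 'e', 'g', 'a', '_', 'K'], ['O', 'm', 'e', 'g', 'a', '_', 'K']), (['[', 'H', ' ', 'I', ']', '_', '{', '\\', 'r', 'm', ' ', '2', '1', 'c', 'm', '}'], ['[', 'H', 'I', ']', '_', '2', '1', 'c', 'm']), (['\\', '\'', 'o'], ['ó'])] : List (List Char × List Char)) w := by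
    intro w
    exact pvStep (by decide) (by decide) (by decide) w
  have s9 : ∀ w, pvRepl '\\' ['`', 'o'] ['ò'] (pvScan ([(['\\', 'L', 'a', 'm', 'b', 'd', 'a'], ['Λ']), (['\\', 'a', 'l', 'p', 'h', 'a'], ['α']), (['\\', 'g', 'a', 'm', 'm', 'a'], ['γ']), (['\\', 's', 'i', 'm'], ['~']), (['H', '_', '0'], ['H', '0']), (['\\', 'O', 'm', 'e', 'g', 'a', '_', 'K'], ['O', 'm', 'e', 'g', 'a', '_', 'K']), (['[', 'H', ' ', 'I', ']', '_', '{', '\\', 'r', 'm', ' ', '2', '1', 'c', 'm', '}'], ['[', 'H', 'I', ']', '_', '2', '1', 'c', 'm']), (['\\', '\'', 'o'], ['ó'])] : List (List Char × List Char)) w) =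
      pvScan ([(['\\', 'L', 'a', 'm', 'b', 'd', 'a'], ['Λ']), (['\\', 'a', 'l', 'p', 'h', 'a'], ['α']), (['\\', 'g', 'a', 'm', 'm', 'a'], ['γ']), (['\\', 's', 'i', 'm'], ['~']), (['H', '_', '0'], ['H', '0']), (['\\', 'O', 'm', 'e', 'g', 'a', '_', 'K'], ['O', 'm', 'e', 'g', 'a', '_', 'K']), (['[', 'H', ' ', 'I', ']', '_', '{', '\\', 'r', 'm', ' ', '2', '1', 'c', 'm', '}'], ['[', 'H', 'I', ']', '_', '2', '1', 'c', 'm']), (['\\', '\'', 'o'], ['ó']), (['\\', '`', 'o'], ['ò'])] : List (List Char × List Char)) w := by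
    intro w
    exact pvStep (by decide) (by decide) (by decide) w
  have s10 : ∀ w, pvRepl '\\' ['^', '{', 'i', '}'] ['i'] (pvScan ([(['\\', 'L', 'a', 'm', 'b', 'd', 'a'], ['Λ']), (['\\', 'a', 'l', 'p', 'h', 'a'], ['α']), (['\\', 'g', 'a', 'm', 'm', 'a'], ['γ']), (['\\', 's', 'i', 'm'], ['~']), (['H', '_', '0'], ['H', '0']), (['\\', 'O', 'm', 'e', 'g', 'a', '_', 'K'], ['O', 'm', 'e', 'g', 'a', '_', 'K']), (['[', 'H', ' ', 'I', ']', '_', '{', '\\', 'r', 'm', ' ', '2', '1', 'c', 'm', '}'], ['[', 'H', 'I', ']', '_', '2', '1', 'c', 'm']), (['\\', '\'', 'o'], ['ó']), (['\\', '`', 'o'], ['ò'])] : List (List Char × List Char)) w) =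
      pvScan ([(['\\', 'L', 'a', 'm', 'b', 'd', 'a'], ['Λ']), (['\\', 'a', 'l', 'p', 'h', 'a'], ['α']), (['\\', 'g', 'a', 'm', 'm', 'a'], ['γ']), (['\\', 's', 'i', 'm'], ['~']), (['H', '_', '0'], ['H', '0']), (['\\', 'O', 'm', 'e', 'g', 'a', '_', 'K'], ['O', 'm', 'e', 'g', 'a', '_', 'K']), (['[', 'H', ' ', 'I', ']', '_', '{', '\\', 'r', 'm', ' ', '2', '1', 'c', 'm', '}'], ['[', 'H', 'I', ']', '_', '2', '1', 'c', 'm']), (['\\', '\'', 'o'], ['ó']), (['\\', '`', 'o'], ['ò']), (['\\', '^', '{', 'i', '}'], ['i'])] : List (List Char × List Char)) w := by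
    intro w
    exact pvStep (by decide) (by decide) (by decide) w
  rw [s1 u, s2 u, s3 u, s4 u, s5 u, s6 u, s7 u, s8 u, s9 u, s10 u]

theorem pvFold_toList : ∀ (L : List (String × String)) (s : String),
    L.foldl (fun t kv => PySem.Str.replace t kv.1 kv.2) s =
      String.ofList ((L.map (fun kv => (kv.1.toList, kv.2.toList))).foldl
        (fun t kv => PySem.Chars.replace t kv.1 kv.2) s.toList) := by
  intro L
  induction L with
  | nil => intro s; simp [String.ofList_toList]
  | cons kv L ih =>
    intro s
    simp only [List.foldl, List.map]
    rw [ih (PySem.Str.replace s kv.1 kv.2), PySem.Str.toList_replace]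

-- ===== VERDICT (by name: the statement is the Claim_ definition above) =====
theorem term_readable_spec : Claim_equal_term_readable := by
  intro text _
  show term_readable text = term_readable_alt text
  rw [term_readable, term_readable_alt, pvFold_toList, pvChain]
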